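-- pv_equiv track=rewrite | github.com/IvanDezaD/Proyecto2Aoc2 | WorkingDir2/Tests/codificador.py | print_memory
-- ===== SOURCE A (Python) =====
-- BLOCK_SIZE       = 8    # Numero de palabras por linea en la memoria
--
-- AVISO_MEMORIA_DATOS = """
-- -- Memoria de datos guardada en datos.hex.
-- -- Sustituyela por la del fichero RAM-D.vhd (o parecido).
-- """[1:]
--
-- def print_memory(ram):
--     HEADER = "signal RAM : RamType :=          ( "
--     PADDING_SIZE = 35
--     PADDING = ' '*PADDING_SIZE
--
--     S = ""
--     for (i, memoria) in enumerate(ram):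
--         if i > 0 and i % BLOCK_SIZE == 0:
--             S += "\n" + PADDING
--         S += memoria + ", "
--
--     return AVISO_MEMORIA_DATOS + HEADER + S[:-2] + ");\n"
-- ===== SOURCE B (Python) =====
-- BLOCK_SIZE = 8
--
-- AVISO_MEMORIA_DATOS = """
-- -- Memoria de datos guardada en datos.hex.
-- -- Sustituyela por la del fichero RAM-D.vhd (o parecido).
-- """[1:]
--
--
-- def print_memory(ram):
--     HEADER = "signal RAM : RamType :=          ( "
--     PADDING = ' ' * 35
--     chunks = [ram[i:i + BLOCK_SIZE] for i in range(0, len(ram), BLOCK_SIZE)]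
--     body = (", \n" + PADDING).join(", ".join(chunk) for chunk in chunks)
--     return AVISO_MEMORIA_DATOS + HEADER + body + ");\n"
-- ===== Notes on version B (the rewrite author's own statement) =====
-- stated objective: simpler
-- what changed: Replaces A's single pass with an index/modulo accumulator and trailing-separator strip by a two-level decomposition: slice ram into BLOCK_SIZE chunks, join each chunk with ', ' and join the lines with ', \n'+PADDING, so no trailing separator ever exists.
import Mathlib
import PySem

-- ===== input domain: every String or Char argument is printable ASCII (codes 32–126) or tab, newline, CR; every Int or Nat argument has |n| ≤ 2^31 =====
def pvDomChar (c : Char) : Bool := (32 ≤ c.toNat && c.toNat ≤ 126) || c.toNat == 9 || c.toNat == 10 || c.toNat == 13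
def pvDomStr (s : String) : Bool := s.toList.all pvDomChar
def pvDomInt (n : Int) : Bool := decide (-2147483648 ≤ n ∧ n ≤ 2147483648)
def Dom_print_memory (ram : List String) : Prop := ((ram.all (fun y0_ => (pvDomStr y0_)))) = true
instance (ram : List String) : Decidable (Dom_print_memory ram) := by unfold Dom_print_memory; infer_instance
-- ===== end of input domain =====

-- B replaces A's per-element index/modulo accumulator by chunking the list into
-- BLOCK_SIZE slices and joining them (objective: simpler two-level decomposition).

-- shared module constants
def pvAviso : String := "-- Memoria de datos guardada en datos.hex.\n-- Sustituyela por la del fichero RAM-D.vhd (o parecido).\n"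
def pvHeader : String := "signal RAM : RamType :=          ( "
def pvPadding : String := String.ofList (List.replicate 35 ' ')

-- ===== PORT A =====
-- the body of A's for-loop over enumerate(ram)
def pvStep (S : String) (p : Int × String) : String :=
  (if 0 < p.1 ∧ PySem.Int.mod p.1 8 = 0 then S ++ "\n" ++ pvPadding else S) ++ p.2 ++ ", "

def print_memory (ram : List String) : String :=
  let S := (PySem.List.enumerate ram).foldl pvStep ""
  pvAviso ++ pvHeader ++ PySem.Str.slice S none (some (-2)) ++ ");\n"

-- ===== PORT B =====
def print_memory_alt (ram : List String) : String :=
  let chunks := (PySem.List.pyRange 0 (ram.length : Int) 8).map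
      (fun i => PySem.List.slice ram (some i) (some (i + 8)))
  let body := PySem.Str.join (", \n" ++ pvPadding) (chunks.map (fun c => PySem.Str.join ", " c))
  pvAviso ++ pvHeader ++ body ++ ");\n"

-- ===== PRECONDITION & SPEC =====
def Spec_print_memory (ram : List String) (out : String) : Prop := out = print_memory_alt ram
instance (ram : List String) (out : String) : Decidable (Spec_print_memory ram out) := by unfold Spec_print_memory; infer_instance

-- ===== CLAIM (what is proved, stated in full; the proofs are below) =====
def Claim_equal_print_memory : Prop := ∀ (ram : List String), Dom_print_memory ram → Spec_print_memory ram (print_memory ram)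

-- ===== LEMMAS AND PROOFS =====

-- words of one block, each suffixed by ", " (what A's loop emits inside a block)
def pvChunkStr (c : List String) : String := c.foldr (fun w acc => w ++ ", " ++ acc) ""

-- consecutive blocks of 8
def pvChunks {α : Type} (l : List α) : List (List α) :=
  if h : l = [] then [] else l.take 8 :: pvChunks (l.drop 8)
termination_by l.length
decreasing_by
  have : l.length ≠ 0 := by simpa using h
  simp; omega

-- what A's loop emits from a block boundary on (index divisible by 8, positive)
def pvG (l : List String) : String :=
  if h : l = [] then "" else "\n" ++ pvPadding ++ pvChunkStr (l.take 8) ++ pvG (l.drop 8)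
termination_by l.length
decreasing_by
  have : l.length ≠ 0 := by simpa using h
  simp; omega

theorem pvMod8 (s : Int) : PySem.Int.mod s 8 = s % 8 := by
  simp [PySem.Int.mod, Int.fmod_eq_emod]

theorem pvStep_not (S x : String) (s : Int) (h : ¬(0 < s ∧ s % 8 = 0)) :
    pvStep S (s, x) = S ++ x ++ ", " := by
  simp only [pvStep, pvMod8]
  rw [if_neg h]

theorem pvStep_yes (S x : String) (s : Int) (h : 0 < s ∧ s % 8 = 0) :
    pvStep S (s, x) = S ++ "\n" ++ pvPadding ++ x ++ ", " := by
  simp only [pvStep, pvMod8]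
  rw [if_pos h]

theorem pvJoin_one (sep x : String) : PySem.Str.join sep [x] = x := by
  rw [← String.toList_inj]
  simp [PySem.Str.join, PySem.Chars.join_singleton]

theorem pvJoin_cons_cons (sep x y : String) (t : List String) :
    PySem.Str.join sep (x :: y :: t) = x ++ sep ++ PySem.Str.join sep (y :: t) := by
  rw [← String.toList_inj]
  simp [PySem.Str.join, PySem.Chars.join_cons_cons, String.toList_append]

theorem pvChunkStr_join (c : List String) (hc : c ≠ []) :
    pvChunkStr c = PySem.Str.join ", " c ++ ", " := by
  induction c with
  | nil => simp at hc
  | cons x t ih =>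
    cases t with
    | nil => simp [pvChunkStr, pvJoin_one]
    | cons y u =>
      rw [pvJoin_cons_cons]
      simp only [pvChunkStr, List.foldr_cons] at ih ⊢
      rw [ih (by simp)]
      simp [String.append_assoc]

-- A's loop inside a block: indices not divisible by 8
theorem pvFold_interior (c : List String) (s : Int) (acc : String)
    (h1 : 0 < s % 8) (h2 : s % 8 + c.length ≤ 8) :
    (PySem.List.enumerate c s).foldl pvStep acc = acc ++ pvChunkStr c := by
  induction c generalizing s acc with
  | nil => simp [pvChunkStr]
  | cons x t ih =>
    rw [PySem.List.enumerate_cons, List.foldl_cons, pvStep_not _ _ _ (by omega)]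
    cases t with
    | nil => simp [pvChunkStr, String.append_assoc]
    | cons y u =>
      rw [ih (s + 1) _ (by simp at h2; omega) (by simp at h2 ⊢; omega)]
      simp [pvChunkStr, String.append_assoc]

-- A's loop on a block that starts at a positive multiple of 8
theorem pvFold_block (c : List String) (s : Int) (acc : String)
    (hc : c ≠ []) (hs : 0 < s) (hm : s % 8 = 0) (hl : c.length ≤ 8) :
    (PySem.List.enumerate c s).foldl pvStep acc
      = acc ++ "\n" ++ pvPadding ++ pvChunkStr c := by
  cases c with
  | nil => simp at hc
  | cons x t =>
    rw [PySem.List.enumerate_cons, List.foldl_cons, pvStep_yes _ _ _ ⟨hs, hm⟩,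
        pvFold_interior t (s + 1) _ (by omega) (by simp at hl ⊢; omega)]
    simp [pvChunkStr, String.append_assoc]

-- A's loop on the first block (indices 0..7)
theorem pvFold_first (c : List String) (acc : String) (hl : c.length ≤ 8) :
    (PySem.List.enumerate c 0).foldl pvStep acc = acc ++ pvChunkStr c := by
  cases c with
  | nil => simp [pvChunkStr]
  | cons x t =>
    rw [PySem.List.enumerate_cons, List.foldl_cons, pvStep_not _ _ _ (by omega)]
    simp only [zero_add]
    rw [pvFold_interior t 1 _ (by omega) (by simp at hl ⊢; omega)]
    simp [pvChunkStr, String.append_assoc]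

-- A's loop from a block boundary on
theorem pvFold_G (l : List String) :
    ∀ (m : Int) (acc : String), 0 < m → m % 8 = 0 →
      (PySem.List.enumerate l m).foldl pvStep acc = acc ++ pvG l := by
  induction l using pvG.induct with
  | case1 => intro m acc _ _; rw [pvG.eq_def]; simp
  | case2 l h ih =>
    intro m acc hm hmod
    have hsplit : PySem.List.enumerate l m
        = PySem.List.enumerate (l.take 8) m
          ++ PySem.List.enumerate (l.drop 8) (m + (l.take 8).length) := by
      conv_lhs => rw [← List.take_append_drop 8 l]
      rw [PySem.List.enumerate_append]
    rw [hsplit, List.foldl_append,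
        pvFold_block (l.take 8) m acc (by simpa using h) hm hmod (by simp)]
    conv_rhs => rw [pvG.eq_def]
    rw [dif_neg h]
    by_cases hd : l.drop 8 = []
    · rw [hd]
      rw [show pvG ([] : List String) = "" from by rw [pvG.eq_def]; simp]
      simp [String.append_assoc]
    · have h8 : 8 < l.length := by
        by_contra hh
        exact hd (by simp; omega)
      have hlen : ((l.take 8).length : Int) = 8 := by simp; omega
      rw [hlen, ih (m + 8) _ (by omega) (by omega)]
      simp [String.append_assoc]

-- full characterisation of A's accumulated string S
theorem pvFold_total (l : List String) (hl : l ≠ []) :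
    (PySem.List.enumerate l).foldl pvStep ""
      = pvChunkStr (l.take 8) ++ pvG (l.drop 8) := by
  have hsplit : PySem.List.enumerate l (0 : Int)
      = PySem.List.enumerate (l.take 8) 0
        ++ PySem.List.enumerate (l.drop 8) (0 + (l.take 8).length) := by
    conv_lhs => rw [← List.take_append_drop 8 l]
    rw [PySem.List.enumerate_append]
  rw [hsplit, List.foldl_append, pvFold_first (l.take 8) _ (by simp)]
  by_cases hd : l.drop 8 = []
  · rw [hd]
    rw [show pvG ([] : List String) = "" from by rw [pvG.eq_def]; simp]
    simp [PySem.List.enumerate_nil]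
  · have h8 : 8 < l.length := by
      by_contra hh
      exact hd (by simp; omega)
    have hlen : ((l.take 8).length : Int) = 8 := by simp; omega
    rw [hlen]
    simp only [zero_add]
    rw [pvFold_G (l.drop 8) 8 _ (by omega) (by omega)]
    simp

-- pvChunks as an indexed family
theorem pvChunks_eq_range (l : List String) :
    pvChunks l = (List.range ((l.length + 7) / 8)).map (fun k => (l.drop (8 * k)).take 8) := by
  induction l using pvChunks.induct with
  | case1 => rw [pvChunks.eq_def]; simp
  | case2 l h ih =>
    have hn : l.length ≠ 0 := by simpa using h
    have hdiv : (l.length + 7) / 8 = ((l.drop 8).length + 7) / 8 + 1 := by simp; omega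
    rw [pvChunks.eq_def, dif_neg h, ih, hdiv, List.range_succ_eq_map]
    simp only [List.map_cons, List.map_map, Nat.mul_zero, List.drop_zero]
    congr 1
    apply List.map_congr_left
    intro k _
    simp only [Function.comp_apply, List.drop_drop]
    congr 2
    omega

-- B's slice comprehension builds exactly the blocks of 8
theorem pvSlices_eq_chunks (l : List String) :
    (PySem.List.pyRange 0 (l.length : Int) 8).map
        (fun i => PySem.List.slice l (some i) (some (i + 8)))
      = pvChunks l := by
  rw [PySem.List.pyRange_of_pos 0 (l.length : Int) (by norm_num), pvChunks_eq_range]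
  have hcnt : (if (0 : Int) < (l.length : Int) then (((l.length : Int) - 0 + 8 - 1) / 8).toNat else 0)
      = (l.length + 7) / 8 := by
    split_ifs with h0 <;> omega
  rw [hcnt, List.map_map]
  apply List.map_congr_left
  intro k _
  simp only [Function.comp_apply, zero_add]
  simpa using PySem.List.slice_natCast_add l (8 * k) 8

-- the trailing ", " of A's S is exactly what [:-2] removes
theorem pvSlice_drop2 (body : String) :
    PySem.Str.slice (body ++ ", ") none (some (-2)) = body := by
  rw [← String.toList_inj]
  rw [PySem.Str.toList_slice, PySem.Chars.slice_eq_listSlice]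
  rw [PySem.List.slice_to_neg_ofNat _ 2 (by norm_num)]
  simp [String.toList_append]

-- A's chunk string agrees with B's joined body, up to the trailing ", "
theorem pvBody_eq (l : List String) (hl : l ≠ []) :
    pvChunkStr (l.take 8) ++ pvG (l.drop 8)
      = PySem.Str.join (", \n" ++ pvPadding) ((pvChunks l).map (fun c => PySem.Str.join ", " c))
        ++ ", " := by
  induction l using pvG.induct with
  | case1 => simp at hl
  | case2 l h ih =>
    rw [pvChunks.eq_def, dif_neg h]
    by_cases hd : l.drop 8 = []
    · rw [hd]
      rw [show pvG ([] : List String) = "" from by rw [pvG.eq_def]; simp,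
          show pvChunks ([] : List String) = [] from by rw [pvChunks.eq_def]; simp]
      simp only [List.map_cons, List.map_nil, pvJoin_one]
      rw [pvChunkStr_join _ (by simpa using h)]
      simp
    · obtain ⟨b, t, hbt⟩ : ∃ b t, pvChunks (l.drop 8) = b :: t := by
        cases hcc : pvChunks (l.drop 8) with
        | nil => rw [pvChunks.eq_def] at hcc; simp [hd] at hcc
        | cons b t => exact ⟨_, _, rfl⟩
      have ihd := ih hd
      rw [hbt, List.map_cons] at ihd
      rw [hbt, List.map_cons, List.map_cons, pvJoin_cons_cons]
      rw [pvG.eq_def, dif_neg hd]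
      rw [pvChunkStr_join (l.take 8) (by simpa using h)]
      rw [show (", \n" : String) = ", " ++ "\n" from rfl] at ihd ⊢
      simp only [String.append_assoc] at ihd ⊢
      rw [ihd]

-- ===== VERDICT (by name: the statement is the Claim_ definition above) =====
theorem print_memory_spec : Claim_equal_print_memory := by
  intro ram _hdom
  unfold Spec_print_memory
  by_cases hr : ram = []
  · subst hr; rfl
  · simp only [print_memory, print_memory_alt]
    rw [pvFold_total ram hr, pvSlices_eq_chunks, pvBody_eq ram hr, pvSlice_drop2]
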